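-- pv_equiv track=rewrite | github.com/Primus19/aws-cf-terraform-migrator | src/aws_cf_terraform_migrator/modules.py | _organize_by_lifecycle
-- ===== SOURCE A (Python) =====
-- from typing import Dict, List, Optional, Any, Set, Tuple
-- from collections import defaultdict
--
-- def _organize_by_lifecycle(resources: Dict[str, Any]) -> Dict[str, List[str]]:
--     """Organize resources by operational lifecycle"""
--     modules = defaultdict(list)
--
--     # Define lifecycle categories
--     shared_infrastructure = [
--         'AWS::EC2::VPC', 'AWS::EC2::Subnet', 'AWS::EC2::InternetGateway',
--         'AWS::EC2::RouteTable', 'AWS::EC2::Route', 'AWS::EC2::NatGateway',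
--         'AWS::IAM::Role', 'AWS::KMS::Key', 'AWS::Route53::HostedZone'
--     ]
--
--     application_resources = [
--         'AWS::EC2::Instance', 'AWS::Lambda::Function', 'AWS::ECS::Service',
--         'AWS::AutoScaling::AutoScalingGroup', 'AWS::ElasticLoadBalancingV2::LoadBalancer'
--     ]
--
--     data_resources = [
--         'AWS::RDS::DBInstance', 'AWS::RDS::DBCluster', 'AWS::DynamoDB::Table',
--         'AWS::S3::Bucket', 'AWS::ElastiCache::ReplicationGroup'
--     ]
--
--     for resource_id, resource_info in resources.items():
--         resource_type = resource_info.get('resource_type', '')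
--
--         if resource_type in shared_infrastructure:
--             modules['shared_infrastructure'].append(resource_id)
--         elif resource_type in application_resources:
--             modules['application_resources'].append(resource_id)
--         elif resource_type in data_resources:
--             modules['data_resources'].append(resource_id)
--         else:
--             modules['supporting_resources'].append(resource_id)
--
--     return dict(modules)
-- ===== SOURCE B (Python) =====
-- def _organize_by_lifecycle(resources):
--     """Organize resources by operational lifecycle: label each resource once,
--     then group by category (first-seen category order)."""
--     type_to_cat = {
--         'AWS::EC2::VPC': 'shared_infrastructure',
--         'AWS::EC2::Subnet': 'shared_infrastructure',
--         'AWS::EC2::InternetGateway': 'shared_infrastructure',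
--         'AWS::EC2::RouteTable': 'shared_infrastructure',
--         'AWS::EC2::Route': 'shared_infrastructure',
--         'AWS::EC2::NatGateway': 'shared_infrastructure',
--         'AWS::IAM::Role': 'shared_infrastructure',
--         'AWS::KMS::Key': 'shared_infrastructure',
--         'AWS::Route53::HostedZone': 'shared_infrastructure',
--         'AWS::EC2::Instance': 'application_resources',
--         'AWS::Lambda::Function': 'application_resources',
--         'AWS::ECS::Service': 'application_resources',
--         'AWS::AutoScaling::AutoScalingGroup': 'application_resources',
--         'AWS::ElasticLoadBalancingV2::LoadBalancer': 'application_resources',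
--         'AWS::RDS::DBInstance': 'data_resources',
--         'AWS::RDS::DBCluster': 'data_resources',
--         'AWS::DynamoDB::Table': 'data_resources',
--         'AWS::S3::Bucket': 'data_resources',
--         'AWS::ElastiCache::ReplicationGroup': 'data_resources',
--     }
--     labels = [(rid, type_to_cat.get(info.get('resource_type', ''), 'supporting_resources'))
--               for rid, info in resources.items()]
--     order = list(dict.fromkeys(cat for _, cat in labels))
--     return {cat: [rid for rid, c in labels if c == cat] for cat in order}
-- ===== Notes on version B (the rewrite author's own statement) =====
-- stated objective: alternative
-- what changed: Replaces A's single-pass defaultdict accumulator with four membership branches by a staged pipeline: one labelling pass over a flat type-to-category table, an ordered dedup of the categories seen, and a grouping dict comprehension that collects each category's ids by filtering the labelled list.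
import Mathlib
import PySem

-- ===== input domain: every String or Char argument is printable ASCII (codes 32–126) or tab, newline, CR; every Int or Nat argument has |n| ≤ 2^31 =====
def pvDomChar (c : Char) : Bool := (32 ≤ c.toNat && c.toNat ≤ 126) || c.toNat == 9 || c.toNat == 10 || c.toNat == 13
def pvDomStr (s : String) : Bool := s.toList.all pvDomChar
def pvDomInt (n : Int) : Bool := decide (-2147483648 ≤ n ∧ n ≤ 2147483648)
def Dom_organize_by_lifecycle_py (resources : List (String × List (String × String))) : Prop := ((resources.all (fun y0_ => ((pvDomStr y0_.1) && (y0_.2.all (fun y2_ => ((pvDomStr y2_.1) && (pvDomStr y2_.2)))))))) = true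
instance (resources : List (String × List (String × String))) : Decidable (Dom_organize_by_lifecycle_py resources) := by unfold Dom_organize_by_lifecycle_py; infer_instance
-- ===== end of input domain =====

-- B replaces A's single-pass defaultdict accumulator with a label pass, an ordered dedup of categories, and per-category grouping; objective: alternative.


-- ===== PORT A =====
def pvSharedInfrastructure : List String :=
  ["AWS::EC2::VPC", "AWS::EC2::Subnet", "AWS::EC2::InternetGateway",
   "AWS::EC2::RouteTable", "AWS::EC2::Route", "AWS::EC2::NatGateway",
   "AWS::IAM::Role", "AWS::KMS::Key", "AWS::Route53::HostedZone"]

def pvApplicationResources : List String :=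
  ["AWS::EC2::Instance", "AWS::Lambda::Function", "AWS::ECS::Service",
   "AWS::AutoScaling::AutoScalingGroup", "AWS::ElasticLoadBalancingV2::LoadBalancer"]

def pvDataResources : List String :=
  ["AWS::RDS::DBInstance", "AWS::RDS::DBCluster", "AWS::DynamoDB::Table",
   "AWS::S3::Bucket", "AWS::ElastiCache::ReplicationGroup"]

def organize_by_lifecycle_py (resources : List (String × List (String × String))) : List (String × List String) :=
  (resources.foldl
    (fun (modules : PySem.Dict String (List String)) p =>
      let resource_type := (PySem.Dict.mk p.2).getD "resource_type" ""
      if resource_type ∈ pvSharedInfrastructure then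
        modules.modify "shared_infrastructure" [] (· ++ [p.1])
      else if resource_type ∈ pvApplicationResources then
        modules.modify "application_resources" [] (· ++ [p.1])
      else if resource_type ∈ pvDataResources then
        modules.modify "data_resources" [] (· ++ [p.1])
      else
        modules.modify "supporting_resources" [] (· ++ [p.1]))
    PySem.Dict.empty).items

-- ===== PORT B =====
-- the flat literal dict type_to_cat of Source B
def pvTypeToCat : PySem.Dict String String :=
  PySem.Dict.mk
    [("AWS::EC2::VPC", "shared_infrastructure"),
     ("AWS::EC2::Subnet", "shared_infrastructure"),
     ("AWS::EC2::InternetGateway", "shared_infrastructure"),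
     ("AWS::EC2::RouteTable", "shared_infrastructure"),
     ("AWS::EC2::Route", "shared_infrastructure"),
     ("AWS::EC2::NatGateway", "shared_infrastructure"),
     ("AWS::IAM::Role", "shared_infrastructure"),
     ("AWS::KMS::Key", "shared_infrastructure"),
     ("AWS::Route53::HostedZone", "shared_infrastructure"),
     ("AWS::EC2::Instance", "application_resources"),
     ("AWS::Lambda::Function", "application_resources"),
     ("AWS::ECS::Service", "application_resources"),
     ("AWS::AutoScaling::AutoScalingGroup", "application_resources"),
     ("AWS::ElasticLoadBalancingV2::LoadBalancer", "application_resources"),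
     ("AWS::RDS::DBInstance", "data_resources"),
     ("AWS::RDS::DBCluster", "data_resources"),
     ("AWS::DynamoDB::Table", "data_resources"),
     ("AWS::S3::Bucket", "data_resources"),
     ("AWS::ElastiCache::ReplicationGroup", "data_resources")]

def organize_by_lifecycle_py_alt (resources : List (String × List (String × String))) : List (String × List String) :=
  let labels := resources.map (fun p =>
    (p.1, pvTypeToCat.getD ((PySem.Dict.mk p.2).getD "resource_type" "") "supporting_resources"))
  let order := PySem.List.dedup (labels.map (·.2))
  order.map (fun cat => (cat, (labels.filter (fun q => q.2 == cat)).map (·.1)))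

-- ===== PRECONDITION & SPEC =====
def Spec_organize_by_lifecycle_py (resources : List (String × List (String × String))) (out : List (String × List String)) : Prop := out = organize_by_lifecycle_py_alt resources
instance (resources : List (String × List (String × String))) (out : List (String × List String)) : Decidable (Spec_organize_by_lifecycle_py resources out) := by unfold Spec_organize_by_lifecycle_py; infer_instance

-- ===== CLAIM =====
def Claim_equal_organize_by_lifecycle_py : Prop := ∀ (resources : List (String × List (String × String))), Dom_organize_by_lifecycle_py resources → Spec_organize_by_lifecycle_py resources (organize_by_lifecycle_py resources)

-- ===== LEMMAS AND PROOFS =====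

-- B's single table lookup equals A's if/elif membership chain
-- first-match lookup in a block of entries that all map to the same category
theorem getD_mk_block (xs : List String) (c : String) (rest : List (String × String)) (t d : String) :
    (PySem.Dict.mk (xs.map (fun x => (x, c)) ++ rest)).getD t d
      = if t ∈ xs then c else (PySem.Dict.mk rest).getD t d := by
  induction xs with
  | nil => simp
  | cons x xs ih =>
    simp only [List.map_cons, List.cons_append, PySem.Dict.getD_eq_get?_getD,
      PySem.Dict.get?_mk_cons] at *
    by_cases hx : x = t
    · subst hx; simp
    · simp only [beq_iff_eq, hx, if_false, List.mem_cons]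
      rw [ih]
      rcases eq_or_ne t x with h | h
      · exact absurd h.symm hx
      · simp [h]

-- B's single table lookup equals A's if/elif membership chain
theorem typeToCat_eq_chain (t : String) :
    pvTypeToCat.getD t "supporting_resources"
      = if t ∈ pvSharedInfrastructure then "shared_infrastructure"
        else if t ∈ pvApplicationResources then "application_resources"
        else if t ∈ pvDataResources then "data_resources"
        else "supporting_resources" := by
  show (PySem.Dict.mk
      (pvSharedInfrastructure.map (fun x => (x, "shared_infrastructure")) ++
       (pvApplicationResources.map (fun x => (x, "application_resources")) ++
        (pvDataResources.map (fun x => (x, "data_resources")) ++ [])))).getD t "supporting_resources" = _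
  rw [getD_mk_block, getD_mk_block, getD_mk_block]
  simp only [PySem.Dict.getD_eq_get?_getD]
  rfl

-- the classification A and B share, as a named function (proof-side only)
def pvCat (p : String × List (String × String)) : String :=
  pvTypeToCat.getD ((PySem.Dict.mk p.2).getD "resource_type" "") "supporting_resources"

-- A's accumulator loop, rewritten through PySem's grouping lemmas
theorem portA_eq_grouped (resources : List (String × List (String × String))) :
    organize_by_lifecycle_py resources
      = (PySem.List.dedup (resources.map pvCat)).map
          (fun c => (c, ((resources.map (fun p => (pvCat p, p.1))).filter
              (fun q => q.1 == c)).map (·.2))) := by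
  unfold organize_by_lifecycle_py
  have hfun : (fun (modules : PySem.Dict String (List String)) (p : String × List (String × String)) =>
      let resource_type := (PySem.Dict.mk p.2).getD "resource_type" ""
      if resource_type ∈ pvSharedInfrastructure then
        modules.modify "shared_infrastructure" [] (· ++ [p.1])
      else if resource_type ∈ pvApplicationResources then
        modules.modify "application_resources" [] (· ++ [p.1])
      else if resource_type ∈ pvDataResources then
        modules.modify "data_resources" [] (· ++ [p.1])
      else
        modules.modify "supporting_resources" [] (· ++ [p.1]))
      = (fun modules p => modules.modify (pvCat p) [] (· ++ [p.1])) := by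
    funext modules p
    simp only [pvCat, typeToCat_eq_chain]
    split_ifs <;> rfl
  rw [hfun]
  have hfold : resources.foldl (fun (d : PySem.Dict String (List String)) p =>
        d.modify (pvCat p) [] (· ++ [p.1])) PySem.Dict.empty
      = (resources.map (fun p => (pvCat p, p.1))).foldl
          (fun d q => d.modify q.1 [] (· ++ [q.2])) PySem.Dict.empty := by
    rw [List.foldl_map]
  rw [hfold]
  set L := resources.map (fun p => (pvCat p, p.1)) with hL
  set D := L.foldl (fun (d : PySem.Dict String (List String)) q =>
    d.modify q.1 [] (· ++ [q.2])) PySem.Dict.empty with hD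
  have hnd : D.keys.Nodup := by
    rw [hD]
    exact PySem.Dict.nodup_keys_foldl_modify_key L (·.1) [] (fun d q => (· ++ [q.2]))
      PySem.Dict.empty (by simp)
  have hkeys : D.keys = PySem.List.dedup (resources.map pvCat) := by
    rw [hD]
    have := PySem.Dict.keys_foldl_modify_key (l := L) (key := (·.1))
      (f := fun d q => (· ++ [q.2])) (d := PySem.Dict.empty) (d0 := [])
    rw [this]
    simp only [PySem.Dict.keys_empty, PySem.Set.update_nil_left, hL, List.map_map]
    simp [PySem.List.dedup_eq_ofList, Function.comp_def]
  have hget : ∀ c, D.getD c [] = (L.filter (fun q => q.1 == c)).map (·.2) := by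
    intro c
    rw [hD, PySem.Dict.getD_foldl_modify_append]
    simp
  rw [PySem.Dict.items_eq_map_keys D hnd [], hkeys]
  refine List.map_congr_left ?_
  intro c _
  rw [hget]

-- ===== VERDICT =====
theorem organize_by_lifecycle_py_spec : Claim_equal_organize_by_lifecycle_py := by
  intro resources _
  show organize_by_lifecycle_py resources = organize_by_lifecycle_py_alt resources
  rw [portA_eq_grouped]
  unfold organize_by_lifecycle_py_alt pvCat
  simp only [List.map_map, List.filter_map, Function.comp_def]
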